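-- pv_equiv track=rewrite | github.com/comic-xr/CoMIC | content_delivery/3DGS/build_matrix_A.py | calculate_subvoxel
-- ===== SOURCE A (Python) =====
-- def calculate_subvoxel(nx,ny,nz):
--     boundx = nx
--     boundy = ny
--     boundz = nz
--     num = 0
--     for start_z in range(nz):
--         for start_y in range(ny):
--             for start_x in range(nx):
--                 for tile_z in range(1,boundz-start_z+1,1):
--                     for tile_y in range(1, boundy - start_y+1, 1):
--                         for tile_x in range(1, boundx - start_x+1, 1):
--                             num += 1
--
--     return num
-- ===== SOURCE B (Python) =====
-- def calculate_subvoxel(nx, ny, nz):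
--     def tri(n):
--         m = n if n > 0 else 0
--         return m * (m + 1) // 2
--     return tri(nx) * tri(ny) * tri(nz)
-- ===== Notes on version B (the rewrite author's own statement) =====
-- stated objective: faster
-- what changed: Replaces the sextuple nested counting loop by the closed form T(nx)*T(ny)*T(nz) with T(n)=n(n+1)/2 (clamped at 0), since each axis contributes the number of (start,length) pairs independently; intended as faster (O(1) closed form vs nested loops) — measured: A timed out at the probe's larger sizes where B returned instantly.
import Mathlib
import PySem

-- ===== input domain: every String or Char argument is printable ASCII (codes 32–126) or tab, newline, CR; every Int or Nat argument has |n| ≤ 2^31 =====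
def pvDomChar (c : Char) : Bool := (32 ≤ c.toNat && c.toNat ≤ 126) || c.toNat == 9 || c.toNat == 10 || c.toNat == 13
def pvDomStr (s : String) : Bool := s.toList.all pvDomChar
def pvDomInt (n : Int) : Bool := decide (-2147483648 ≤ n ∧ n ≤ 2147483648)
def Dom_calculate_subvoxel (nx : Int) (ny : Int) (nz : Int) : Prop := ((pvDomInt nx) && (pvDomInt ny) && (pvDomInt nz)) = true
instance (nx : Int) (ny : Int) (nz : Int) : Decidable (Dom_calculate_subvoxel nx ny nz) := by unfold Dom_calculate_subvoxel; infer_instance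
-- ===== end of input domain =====

-- B replaces A's sextuple counting loop by the closed form T(nx)*T(ny)*T(nz), T(n)=n(n+1)//2 clamped at 0.

-- ===== PORT A =====
-- literal transliteration of A: six nested for-loops incrementing a counter
def calculate_subvoxel (nx : Int) (ny : Int) (nz : Int) : Int :=
  let boundx := nx
  let boundy := ny
  let boundz := nz
  (PySem.List.pyRange 0 nz).foldl (fun num start_z =>
    (PySem.List.pyRange 0 ny).foldl (fun num start_y =>
      (PySem.List.pyRange 0 nx).foldl (fun num start_x =>
        (PySem.List.pyRange 1 (boundz - start_z + 1) 1).foldl (fun num _tile_z =>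
          (PySem.List.pyRange 1 (boundy - start_y + 1) 1).foldl (fun num _tile_y =>
            (PySem.List.pyRange 1 (boundx - start_x + 1) 1).foldl (fun num _tile_x =>
              num + 1) num) num) num) num) num) 0

-- ===== PORT B =====
-- tri(n) = m*(m+1)//2 with m = n if n > 0 else 0
def pvTri (n : Int) : Int :=
  let m := if n > 0 then n else 0
  PySem.Int.floordiv (m * (m + 1)) 2

def calculate_subvoxel_alt (nx : Int) (ny : Int) (nz : Int) : Int :=
  pvTri nx * pvTri ny * pvTri nz

-- ===== PRECONDITION & SPEC =====
def Spec_calculate_subvoxel (nx : Int) (ny : Int) (nz : Int) (out : Int) : Prop := out = calculate_subvoxel_alt nx ny nz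
instance (nx : Int) (ny : Int) (nz : Int) (out : Int) : Decidable (Spec_calculate_subvoxel nx ny nz out) := by unfold Spec_calculate_subvoxel; infer_instance

-- ===== CLAIM (what is proved, stated in full; the proofs are below) =====
def Claim_equal_calculate_subvoxel : Prop := ∀ (nx : Int) (ny : Int) (nz : Int), Dom_calculate_subvoxel nx ny nz → Spec_calculate_subvoxel nx ny nz (calculate_subvoxel nx ny nz)

-- ===== LEMMAS AND PROOFS =====

-- per-start sum along one axis
def pvS (n : Int) : Int := ((PySem.List.pyRange 0 n).map (fun s => n - s)).sum

-- a constant-increment loop adds (length) * c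
theorem pvTileFold (b c : Int) (hb : 0 ≤ b) :
    ∀ num : Int, (PySem.List.pyRange 1 (b + 1) 1).foldl (fun a _ => a + c) num = num + b * c := by
  intro num
  have h := PySem.List.foldl_add (PySem.List.pyRange 1 (b + 1) 1) (fun _ => c) num
  simp only [h, PySem.List.sum_map_const_int, PySem.List.length_pyRange_one]
  have : ((b + 1 - 1).toNat : Int) = b := by omega
  rw [this]

-- one start-position loop sums c * (n - s)
theorem pvLevelFold (n c : Int) (num : Int) :
    (PySem.List.pyRange 0 n).foldl (fun a s => a + c * (n - s)) num = num + c * pvS n := by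
  have h := PySem.List.foldl_add (PySem.List.pyRange 0 n) (fun s => c * (n - s)) num
  simp only [h, pvS, List.sum_map_mul_left]

theorem pvGauss (k : Nat) :
    ((List.range k).map (fun j : Nat => (k : Int) - (j : Int))).sum * 2 = (k : Int) * ((k : Int) + 1) := by
  induction k with
  | zero => simp
  | succ k ih =>
    rw [List.range_succ, List.map_append, List.sum_append]
    have hf : (fun j : Nat => (((k + 1 : Nat) : Int)) - (j : Int)) =
        fun j : Nat => ((k : Int) - (j : Int)) + 1 := by
      funext j; push_cast; ring
    rw [hf, PySem.List.sum_map_add_int, PySem.List.sum_map_const_int, List.length_range]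
    simp only [List.map_cons, List.map_nil, List.sum_cons, List.sum_nil]
    push_cast
    linear_combination ih

theorem pvS_eq_tri (n : Int) : pvS n = pvTri n := by
  by_cases hn : n ≤ 0
  · have hnil : PySem.List.pyRange 0 n = [] := by
      apply List.eq_nil_of_length_eq_zero
      rw [PySem.List.length_pyRange_one]; omega
    have hm : (if n > 0 then n else 0) = 0 := by split <;> omega
    simp [pvS, pvTri, hnil, hm, PySem.Int.floordiv]
  · obtain ⟨k, rfl⟩ : ∃ k : Nat, n = (k : Int) := ⟨n.toNat, (Int.toNat_of_nonneg (by omega)).symm⟩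
    have hS : pvS (k : Int) = ((List.range k).map (fun j : Nat => (k : Int) - (j : Int))).sum := by
      simp only [pvS, PySem.List.pyRange_zero_natCast, List.map_map]
      rfl
    have hg := pvGauss k
    have hm : (if (k : Int) > 0 then (k : Int) else 0) = (k : Int) := by split <;> omega
    have hfd : PySem.Int.floordiv ((k : Int) * ((k : Int) + 1)) 2 =
        ((k : Int) * ((k : Int) + 1)) / 2 := PySem.Int.floordiv_eq_ediv_of_pos (by norm_num)
    simp only [pvTri, hm, hfd]
    omega

theorem pvMain (nx ny nz : Int) :
    calculate_subvoxel nx ny nz = pvS nz * pvS ny * pvS nx := by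
  unfold calculate_subvoxel
  rw [PySem.List.foldl_congr_mem _ _ (fun a sz => a + (pvS ny * pvS nx) * (nz - sz)) 0 ?_]
  · rw [pvLevelFold]; ring
  · intro acc sz hsz
    obtain ⟨hz0, hz1⟩ := PySem.List.mem_pyRange_one.mp hsz
    rw [PySem.List.foldl_congr_mem _ _ (fun a sy => a + ((nz - sz) * pvS nx) * (ny - sy)) acc ?_]
    · rw [pvLevelFold]; ring
    · intro acc2 sy hsy
      obtain ⟨hy0, hy1⟩ := PySem.List.mem_pyRange_one.mp hsy
      rw [PySem.List.foldl_congr_mem _ _ (fun a sx => a + ((nz - sz) * (ny - sy)) * (nx - sx)) acc2 ?_]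
      · rw [pvLevelFold]; ring
      · intro acc3 sx hsx
        obtain ⟨hx0, hx1⟩ := PySem.List.mem_pyRange_one.mp hsx
        simp only [pvTileFold (nx - sx) 1 (by omega), mul_one,
          pvTileFold (ny - sy) (nx - sx) (by omega),
          pvTileFold (nz - sz) ((ny - sy) * (nx - sx)) (by omega)]
        ring

-- ===== VERDICT (by name: the statement is the Claim_ definition above) =====
theorem calculate_subvoxel_spec : Claim_equal_calculate_subvoxel := by
  intro nx ny nz _
  unfold Spec_calculate_subvoxel calculate_subvoxel_alt
  rw [pvMain, pvS_eq_tri, pvS_eq_tri, pvS_eq_tri]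
  ring
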